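-- pv_equiv track=rewrite | github.com/mourisl/T1K | CFTR/1_Create_Reference_Files/VariantMappingAndMutantEnsemblFormatUtils.py | clean_bp_with_indicators
-- ===== SOURCE A (Python) =====
-- def clean_bp_with_indicators(final_bp_with_indicators):
--     """
--     Merge adjacent entries with the same region indicator to simplify the base pair counts.
--
--     Parameters:
--         final_bp_with_indicators (list): A list of tuples (region, bp_count, indicator).
--
--     Returns:
--         list: A cleaned list of tuples with merged base pair counts.
--     """
--     if not final_bp_with_indicators:
--         return []
--
--     cleaned = []
--     current_region, current_bp, current_ind = final_bp_with_indicators[0]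
--
--     for entry in final_bp_with_indicators[1:]:
--         region, bp, ind = entry
--         if ind == current_ind:
--             current_bp += bp
--         else:
--             cleaned.append((current_region, current_bp, current_ind))
--             current_region, current_bp, current_ind = region, bp, ind
--
--     cleaned.append((current_region, current_bp, current_ind))
--     return cleaned
-- ===== SOURCE B (Python) =====
-- def clean_bp_with_indicators(final_bp_with_indicators):
--     """Back-to-front build: walk the input in reverse, merging each element
--     into the head-side (last-appended) entry of the reversed output when the
--     indicator matches, so the earlier element's region overwrites; the final
--     reversal restores original order."""
--     out = []
--     for region, bp, ind in reversed(final_bp_with_indicators):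
--         if out and out[-1][2] == ind:
--             _, prev_bp, _ = out[-1]
--             out[-1] = (region, bp + prev_bp, ind)
--         else:
--             out.append((region, bp, ind))
--     return list(reversed(out))
-- ===== Notes on version B (the rewrite author's own statement) =====
-- stated objective: alternative
-- what changed: Builds the result back-to-front: instead of a forward pass carrying a pending (region,bp,indicator) accumulator with a trailing flush, B walks the input in reverse and merges each element into the already-built cleaned suffix (overwriting the boundary entry's region and adding its bp), then reverses once at the end; there is no pending state and no final flush.
import Mathlib
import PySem

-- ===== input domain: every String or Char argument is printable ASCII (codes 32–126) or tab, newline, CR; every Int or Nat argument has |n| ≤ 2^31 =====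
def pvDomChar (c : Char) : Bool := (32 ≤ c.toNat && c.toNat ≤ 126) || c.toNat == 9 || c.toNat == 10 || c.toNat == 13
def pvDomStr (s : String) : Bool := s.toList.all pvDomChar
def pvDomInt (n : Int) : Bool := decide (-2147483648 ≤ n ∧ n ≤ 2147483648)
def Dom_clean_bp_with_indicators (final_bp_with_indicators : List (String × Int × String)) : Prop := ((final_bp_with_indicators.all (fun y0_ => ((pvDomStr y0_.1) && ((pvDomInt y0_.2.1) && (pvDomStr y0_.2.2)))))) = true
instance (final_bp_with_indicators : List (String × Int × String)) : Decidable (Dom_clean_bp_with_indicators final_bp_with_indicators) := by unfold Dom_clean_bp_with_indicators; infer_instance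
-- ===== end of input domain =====

-- B builds the cleaned list back-to-front (reverse walk merging into the already-built suffix, one final reversal) instead of A's forward pass with a pending accumulator and trailing flush; same O(n) cost.

-- ===== PORT A =====
-- A's loop body: carry (cleaned, current_region, current_bp, current_ind); on an indicator change flush the pending triple.
def clean_bp_loop_step (acc : List (String × Int × String) × String × Int × String)
    (entry : String × Int × String) : List (String × Int × String) × String × Int × String :=
  let (cleaned, cr, cb, ci) := acc
  let (r, b, i) := entry
  if i = ci then (cleaned, cr, cb + b, ci)
  else (cleaned ++ [(cr, cb, ci)], r, b, i)

def clean_bp_with_indicators (final_bp_with_indicators : List (String × Int × String)) : List (String × Int × String) :=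
  match final_bp_with_indicators with
  | [] => []
  | (r0, b0, i0) :: rest =>
    let st := rest.foldl clean_bp_loop_step ([], r0, b0, i0)
    st.1 ++ [(st.2.1, st.2.2.1, st.2.2.2)]

-- ===== PORT B =====
-- B's loop body over the reversed input: 'if out and out[-1][2] == ind' merges into the last-appended
-- entry (out[-1] read via getLast?, rewrite = dropLast ++ [..]), else appends.
def clean_bp_rev_step (out : List (String × Int × String))
    (entry : String × Int × String) : List (String × Int × String) :=
  let (region, bp, ind) := entry
  match out.getLast? with
  | some (_, prev_bp, prev_ind) =>
    if prev_ind = ind then out.dropLast ++ [(region, bp + prev_bp, ind)]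
    else out ++ [(region, bp, ind)]
  | none => out ++ [(region, bp, ind)]

def clean_bp_with_indicators_alt (final_bp_with_indicators : List (String × Int × String)) : List (String × Int × String) :=
  (final_bp_with_indicators.reverse.foldl clean_bp_rev_step []).reverse

-- ===== PRECONDITION & SPEC =====
def Spec_clean_bp_with_indicators (final_bp_with_indicators : List (String × Int × String)) (out : List (String × Int × String)) : Prop := out = clean_bp_with_indicators_alt final_bp_with_indicators
instance (final_bp_with_indicators : List (String × Int × String)) (out : List (String × Int × String)) : Decidable (Spec_clean_bp_with_indicators final_bp_with_indicators out) := by unfold Spec_clean_bp_with_indicators; infer_instance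

-- ===== CLAIM (what is proved, stated in full; the proofs are below) =====
def Claim_equal_clean_bp_with_indicators : Prop := ∀ (final_bp_with_indicators : List (String × Int × String)), Dom_clean_bp_with_indicators final_bp_with_indicators → Spec_clean_bp_with_indicators final_bp_with_indicators (clean_bp_with_indicators final_bp_with_indicators)

-- ===== LEMMAS AND PROOFS =====

-- proof-side view of one merge step in original (left-to-right) order
def pvConsMerge (entry : String × Int × String)
    (rest : List (String × Int × String)) : List (String × Int × String) :=
  match rest with
  | (_, b2, i2) :: t =>
    if i2 = entry.2.2 then (entry.1, entry.2.1 + b2, entry.2.2) :: t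
    else entry :: rest
  | [] => [entry]

lemma pvRevStep_reverse (a : List (String × Int × String)) (y : String × Int × String) :
    (clean_bp_rev_step a y).reverse = pvConsMerge y a.reverse := by
  obtain ⟨r, b, i⟩ := y
  cases h : a.reverse with
  | nil =>
    have ha : a = [] := by simpa using congrArg List.reverse h
    subst ha
    simp [clean_bp_rev_step, pvConsMerge]
  | cons hd tl =>
    have ha : a = tl.reverse ++ [hd] := by
      have := congrArg List.reverse h
      simpa using this
    subst ha
    obtain ⟨r2, b2, i2⟩ := hd
    by_cases hi : i2 = i <;>
      simp [clean_bp_rev_step, pvConsMerge, hi, List.getLast?_append]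

lemma alt_eq_foldr (xs : List (String × Int × String)) :
    clean_bp_with_indicators_alt xs = xs.foldr pvConsMerge [] := by
  induction xs with
  | nil => simp [clean_bp_with_indicators_alt]
  | cons y t ih =>
    unfold clean_bp_with_indicators_alt at *
    rw [List.foldr_cons, ← ih, List.reverse_cons, List.foldl_append, List.foldl_cons,
      List.foldl_nil, pvRevStep_reverse]

lemma pvConsMerge_head (r : String) (b : Int) (i : String)
    (u : List (String × Int × String)) :
    ∃ r' b' t, pvConsMerge (r, b, i) u = (r', b', i) :: t := by
  cases u with
  | nil => exact ⟨r, b, [], rfl⟩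
  | cons hd tl =>
    obtain ⟨r2, b2, i2⟩ := hd
    by_cases hi : i2 = i
    · exact ⟨r, b + b2, tl, by simp [pvConsMerge, hi]⟩
    · exact ⟨r, b, (r2, b2, i2) :: tl, by simp [pvConsMerge, hi]⟩

lemma pvConsMerge_same (cr : String) (cb : Int) (ci : String) (r : String) (b : Int)
    (u : List (String × Int × String)) :
    pvConsMerge (cr, cb, ci) (pvConsMerge (r, b, ci) u) = pvConsMerge (cr, cb + b, ci) u := by
  cases u with
  | nil => simp [pvConsMerge]
  | cons hd tl =>
    obtain ⟨r2, b2, i2⟩ := hd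
    by_cases hi : i2 = ci <;> simp [pvConsMerge, hi, Int.add_assoc]

lemma pvConsMerge_diff (cr : String) (cb : Int) (ci : String) (r : String) (b : Int)
    (i : String) (hne : i ≠ ci) (u : List (String × Int × String)) :
    pvConsMerge (cr, cb, ci) (pvConsMerge (r, b, i) u) =
      (cr, cb, ci) :: pvConsMerge (r, b, i) u := by
  obtain ⟨r', b', t, h⟩ := pvConsMerge_head r b i u
  rw [h]
  simp [pvConsMerge, hne]

-- A's loop invariant: the flushed prefix plus the pending triple merged into B's result of the rest.
lemma pvLoop_eq (rest : List (String × Int × String)) :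
    ∀ (cleaned : List (String × Int × String)) (cr : String) (cb : Int) (ci : String),
      (fun st => st.1 ++ [(st.2.1, st.2.2.1, st.2.2.2)])
          (rest.foldl clean_bp_loop_step (cleaned, cr, cb, ci)) =
        cleaned ++ pvConsMerge (cr, cb, ci) (rest.foldr pvConsMerge []) := by
  induction rest with
  | nil =>
    intro cleaned cr cb ci
    simp [pvConsMerge]
  | cons e t ih =>
    intro cleaned cr cb ci
    obtain ⟨r, b, i⟩ := e
    by_cases h : i = ci
    · subst h
      rw [List.foldl_cons,
        show clean_bp_loop_step (cleaned, cr, cb, i) (r, b, i) = (cleaned, cr, cb + b, i) by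
          simp [clean_bp_loop_step]]
      rw [ih, List.foldr_cons, pvConsMerge_same]
    · rw [List.foldl_cons,
        show clean_bp_loop_step (cleaned, cr, cb, ci) (r, b, i) =
            (cleaned ++ [(cr, cb, ci)], r, b, i) by
          simp [clean_bp_loop_step, h]]
      rw [ih, List.foldr_cons, pvConsMerge_diff cr cb ci r b i h, List.append_assoc]
      simp

-- ===== VERDICT (by name: the statement is the Claim_ definition above) =====
theorem clean_bp_with_indicators_spec : Claim_equal_clean_bp_with_indicators := by
  intro l _
  unfold Spec_clean_bp_with_indicators
  match l with
  | [] => simp [clean_bp_with_indicators, clean_bp_with_indicators_alt]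
  | (r0, b0, i0) :: rest =>
    rw [alt_eq_foldr]
    show (fun st => st.1 ++ [(st.2.1, st.2.2.1, st.2.2.2)])
        (rest.foldl clean_bp_loop_step ([], r0, b0, i0)) = _
    rw [pvLoop_eq, List.foldr_cons]
    simp
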